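-- pv_equiv track=rewrite | github.com/LauJerez/Repositorio_LauraJerez | Corte_3/Sesion_14/Clase_14/Inventario.py | agregar_elementos
-- ===== SOURCE A (Python) =====
-- def crear_inventario(lista):
--     inventario={}
--     for elemento in lista:
--         if elemento not in inventario:
--             inventario[elemento]=1
--         else:
--             inventario[elemento]+=1
--     return inventario
--
-- def agregar_elementos(inv,nuevos):
--     nuevos=crear_inventario(nuevos)
--     for elemento in nuevos:
--         if elemento not in inv:
--             inv[elemento]=nuevos[elemento]
--         else:
--             inv[elemento]+=nuevos[elemento]
--     return inv
-- ===== SOURCE B (Python) =====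
-- def agregar_elementos(inv, nuevos):
--     for elemento in nuevos:
--         if elemento not in inv:
--             inv[elemento] = 1
--         else:
--             inv[elemento] += 1
--     return inv
-- ===== Notes on version B (the rewrite author's own statement) =====
-- stated objective: simpler
-- what changed: B drops A's two-phase count-then-merge (building an intermediate count dict of nuevos and then folding it into inv) and instead accumulates each element of nuevos directly into inv in one pass with no helper.
import Mathlib
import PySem

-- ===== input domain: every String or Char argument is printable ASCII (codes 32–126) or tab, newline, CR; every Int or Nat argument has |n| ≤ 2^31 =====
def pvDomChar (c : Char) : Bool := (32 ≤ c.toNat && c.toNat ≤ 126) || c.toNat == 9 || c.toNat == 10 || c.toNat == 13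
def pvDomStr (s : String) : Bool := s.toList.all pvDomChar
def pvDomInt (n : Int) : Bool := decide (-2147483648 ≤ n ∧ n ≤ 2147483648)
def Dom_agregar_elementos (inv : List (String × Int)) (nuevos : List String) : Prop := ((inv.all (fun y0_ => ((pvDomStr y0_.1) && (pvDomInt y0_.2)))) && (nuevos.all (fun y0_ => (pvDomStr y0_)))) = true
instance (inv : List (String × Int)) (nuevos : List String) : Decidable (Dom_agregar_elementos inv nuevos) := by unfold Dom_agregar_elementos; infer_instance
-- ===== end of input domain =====

-- B merges `nuevos` into `inv` in one direct pass, dropping A's intermediate count table; both mutate and return `inv` (equivalence proved on the returned value).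


-- ===== PORT A =====
def crear_inventario (lista : List String) : PySem.Dict String Int :=
  lista.foldl (fun inventario elemento =>
    if !(inventario.contains elemento) then inventario.insert elemento 1
    else inventario.insert elemento (inventario.getD elemento 0 + 1)) PySem.Dict.empty

def agregar_elementos (inv : List (String × Int)) (nuevos : List String) : List (String × Int) :=
  let nuevosD := crear_inventario nuevos
  (nuevosD.keys.foldl (fun d elemento =>
    if !(d.contains elemento) then d.insert elemento (nuevosD.getD elemento 0)
    else d.insert elemento (d.getD elemento 0 + nuevosD.getD elemento 0)) (PySem.Dict.ofList inv)).items

-- ===== PORT B =====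
def agregar_elementos_alt (inv : List (String × Int)) (nuevos : List String) : List (String × Int) :=
  (nuevos.foldl (fun d elemento =>
    if !(d.contains elemento) then d.insert elemento 1
    else d.insert elemento (d.getD elemento 0 + 1)) (PySem.Dict.ofList inv)).items

-- ===== PRECONDITION & SPEC =====
def Spec_agregar_elementos (inv : List (String × Int)) (nuevos : List String) (out : List (String × Int)) : Prop := out = agregar_elementos_alt inv nuevos
instance (inv : List (String × Int)) (nuevos : List String) (out : List (String × Int)) : Decidable (Spec_agregar_elementos inv nuevos out) := by unfold Spec_agregar_elementos; infer_instance

-- ===== CLAIM (what is proved, stated in full; the proofs are below) =====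
def Claim_equal_agregar_elementos : Prop := ∀ (inv : List (String × Int)) (nuevos : List String), Dom_agregar_elementos inv nuevos → Spec_agregar_elementos inv nuevos (agregar_elementos inv nuevos)

-- ===== LEMMAS AND PROOFS =====

-- B's loop body (and crear_inventario's) is the unconditional "bump by 1" insert.
theorem bump_step_eq (d : PySem.Dict String Int) (e : String) :
    (if !(d.contains e) then d.insert e 1 else d.insert e (d.getD e 0 + 1))
      = d.insert e (d.getD e 0 + 1) := by
  by_cases h : d.contains e = true
  · simp [h]
  · simp only [Bool.not_eq_true] at h
    have h0 : d.getD e 0 = 0 := PySem.Dict.getD_of_not_contains d 0 h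
    simp [h, h0]

theorem crear_inventario_eq_counter (lista : List String) :
    crear_inventario lista = PySem.Dict.counter lista := by
  unfold crear_inventario
  have hf : (fun (d : PySem.Dict String Int) (e : String) =>
      if !(d.contains e) then d.insert e 1 else d.insert e (d.getD e 0 + 1))
      = fun d e => d.insert e (d.getD e 0 + 1) := by
    funext d e; exact bump_step_eq d e
  rw [hf, PySem.Dict.foldl_insert_getD_add_one_eq_counter]

-- A's merge-loop body is the unconditional "add f e" insert.
theorem merge_step_eq (c : PySem.Dict String Int) (d : PySem.Dict String Int) (e : String) :
    (if !(d.contains e) then d.insert e (c.getD e 0)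
     else d.insert e (d.getD e 0 + c.getD e 0))
      = d.insert e (d.getD e 0 + c.getD e 0) := by
  by_cases h : d.contains e = true
  · simp [h]
  · simp only [Bool.not_eq_true] at h
    have h0 : d.getD e 0 = 0 := PySem.Dict.getD_of_not_contains d 0 h
    simp [h, h0]

-- Value of a merge fold over a nodup key list.
theorem merge_getD (ks : List String) (f : String → Int) (d : PySem.Dict String Int)
    (h : ks.Nodup) (v : String) :
    (ks.foldl (fun d k => d.insert k (d.getD k 0 + f k)) d).getD v 0
      = d.getD v 0 + (if v ∈ ks then f v else 0) := by
  induction ks generalizing d with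
  | nil => simp
  | cons k ks ih =>
    simp only [List.foldl_cons]
    rcases List.nodup_cons.mp h with ⟨hk, hks⟩
    by_cases hv : v = k
    · subst hv
      rw [ih _ hks]
      simp [hk, PySem.Dict.getD_insert_self]
    · rw [ih _ hks, PySem.Dict.getD_insert_of_ne d _ 0 hv]
      simp [hv]

theorem set_update_ofList (s : PySem.Set String) (l : List String) :
    PySem.Set.update s (PySem.Set.ofList l) = PySem.Set.update s l := by
  rw [PySem.Set.update_eq_append_filter, PySem.Set.update_eq_append_filter,
    PySem.Set.ofList_ofList]

-- ===== VERDICT (by name: the statement is the Claim_ definition above) =====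
theorem agregar_elementos_spec : Claim_equal_agregar_elementos := by
  intro inv nuevos _
  unfold Spec_agregar_elementos agregar_elementos agregar_elementos_alt
  rw [crear_inventario_eq_counter]
  set c := PySem.Dict.counter nuevos with hc
  set d0 := PySem.Dict.ofList inv with hd0
  have hfA : (fun (d : PySem.Dict String Int) (e : String) =>
      if !(d.contains e) then d.insert e (c.getD e 0)
      else d.insert e (d.getD e 0 + c.getD e 0))
      = fun d e => d.insert e (d.getD e 0 + c.getD e 0) := by
    funext d e; exact merge_step_eq c d e
  have hfB : (fun (d : PySem.Dict String Int) (e : String) =>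
      if !(d.contains e) then d.insert e 1 else d.insert e (d.getD e 0 + 1))
      = fun d e => d.insert e (d.getD e 0 + 1) := by
    funext d e; exact bump_step_eq d e
  simp only [hfA, hfB]
  set dA := c.keys.foldl (fun d k => d.insert k (d.getD k 0 + c.getD k 0)) d0 with hdA
  set dB := nuevos.foldl (fun d e => d.insert e (d.getD e 0 + 1)) d0 with hdB
  have hnd0 : d0.keys.Nodup := PySem.Dict.nodup_keys_ofList inv
  have hndA : dA.keys.Nodup := PySem.Dict.nodup_keys_foldl_insert _ _ _ hnd0
  have hndB : dB.keys.Nodup := PySem.Dict.nodup_keys_foldl_insert _ _ _ hnd0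
  have hkeys : dA.keys = dB.keys := by
    rw [hdA, hdB, PySem.Dict.keys_foldl_insert, PySem.Dict.keys_foldl_insert,
      hc, PySem.Dict.keys_counter, set_update_ofList]
  have hgetD : ∀ v, dA.getD v 0 = dB.getD v 0 := by
    intro v
    rw [hdA, merge_getD _ _ _ (by rw [hc]; exact PySem.Dict.nodup_keys_counter nuevos) v,
      hdB, PySem.Dict.getD_foldl_insert_add_one]
    congr 1
    by_cases hv : v ∈ nuevos
    · simp [hc, PySem.Dict.keys_counter, PySem.Set.mem_ofList, hv, PySem.Dict.getD_counter]
    · simp [hc, PySem.Dict.keys_counter, PySem.Set.mem_ofList, hv,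
        List.count_eq_zero_of_not_mem hv]
  rw [PySem.Dict.items_eq_map_keys dA hndA 0, PySem.Dict.items_eq_map_keys dB hndB 0, hkeys]
  exact List.map_congr_left (fun k _ => by rw [hgetD k])
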